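-- pv_equiv track=rewrite | github.com/iamkissg/nowcoder | companies/bytedance/字节跳动2019春招研发部分编程题汇总/万万没想到之聪明的编辑.py | correct_word_spelling2
-- ===== SOURCE A (Python) =====
-- def correct_word_spelling2(s):
--     res = []
--     for e in s:
--         if len(res) < 2:
--             res.append(e)
--             continue
--         if len(res) >= 2:
--             if e == res[-1] and e == res[-2]:
--                 continue
--         if len(res) >= 3:
--             if e == res[-1] and res[-2] == res[-3]:
--                 continue
--         res.append(e)
--     return "".join(res)
-- ===== SOURCE B (Python) =====
-- def correct_word_spelling2(s):
--     out = []
--     prev_pair = False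
--     i = 0
--     n = len(s)
--     while i < n:
--         j = i
--         while j < n and s[j] == s[i]:
--             j += 1
--         take = 2 if j - i >= 2 else 1
--         if take == 2 and prev_pair:
--             take = 1
--         out.append(s[i] * take)
--         prev_pair = take == 2
--         i = j
--     return "".join(out)
-- ===== Notes on version B (the rewrite author's own statement) =====
-- stated objective: alternative
-- what changed: A scans character by character and decides each append by looking back at the last three characters of the output; B instead splits the input into maximal runs of equal characters and emits min(len,2) copies per run (reduced to 1 after an emitted pair), carrying a single prev_pair boolean, so no look-back into the output is needed.
import Mathlib
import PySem

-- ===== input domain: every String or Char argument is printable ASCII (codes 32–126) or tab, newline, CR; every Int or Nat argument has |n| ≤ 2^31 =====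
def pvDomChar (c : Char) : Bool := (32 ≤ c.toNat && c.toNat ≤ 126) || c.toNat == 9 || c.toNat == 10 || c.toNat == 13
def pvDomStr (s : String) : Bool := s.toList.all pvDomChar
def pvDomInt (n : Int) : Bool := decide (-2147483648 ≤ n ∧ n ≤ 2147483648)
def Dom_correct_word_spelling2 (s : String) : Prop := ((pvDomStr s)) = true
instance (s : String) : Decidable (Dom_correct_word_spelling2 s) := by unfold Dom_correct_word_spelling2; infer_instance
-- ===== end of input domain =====

-- B replaces A's char-by-char loop with look-back into the output by a single pass over
-- maximal runs of equal characters carrying one boolean (was the previous emitted run a pair?);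
-- objective: alternative decomposition at the same cost. Equivalence is about the return value.

-- ===== PORT A =====
-- one iteration of A's for-loop body (res is the growing output list)
def pvStepA (res : List Char) (e : Char) : List Char :=
  if res.length < 2 then res ++ [e]
  else if 2 ≤ res.length ∧ PySem.List.pyGet? res (-1) = some e ∧ PySem.List.pyGet? res (-2) = some e then res
  else if 3 ≤ res.length ∧ PySem.List.pyGet? res (-1) = some e ∧ PySem.List.pyGet? res (-2) = PySem.List.pyGet? res (-3) then res
  else res ++ [e]

def correct_word_spelling2 (s : String) : String :=
  String.ofList (s.toList.foldl pvStepA [])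

-- ===== PORT B =====
-- Source B's outer while-loop: each step consumes one maximal run (the inner while = takeWhile,
-- j = i + run length, so the recursive call continues at rest.drop run.length),
-- emits take copies of its character and updates prev_pair
def pvAltGo : Bool → List Char → List Char
  | _, [] => []
  | prev, c :: rest =>
    let run := rest.takeWhile (fun d => d = c)
    let take0 := if 2 ≤ run.length + 1 then 2 else 1
    let take := if take0 = 2 ∧ prev = true then 1 else take0
    List.replicate take c ++ pvAltGo (decide (take = 2)) (rest.drop run.length)
termination_by _ l => l.length
decreasing_by simp

def correct_word_spelling2_alt (s : String) : String :=
  String.ofList (pvAltGo false s.toList)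

-- ===== PRECONDITION & SPEC =====
def Spec_correct_word_spelling2 (s : String) (out : String) : Prop := out = correct_word_spelling2_alt s
instance (s : String) (out : String) : Decidable (Spec_correct_word_spelling2 s out) := by unfold Spec_correct_word_spelling2; infer_instance

-- ===== CLAIM (what is proved, stated in full; the proofs are below) =====
def Claim_equal_correct_word_spelling2 : Prop := ∀ (s : String), Dom_correct_word_spelling2 s → Spec_correct_word_spelling2 s (correct_word_spelling2 s)

-- ===== LEMMAS AND PROOFS =====

-- evaluating A's negative lookups res[-2] and res[-3] on lists with an explicit tail
lemma pvGet2 (t : List Char) (a b : Char) :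
    PySem.List.pyGet? (t ++ [a, b]) (-2) = some a := by
  rw [PySem.List.pyGet?_neg_ofNat _ 2 (by omega) (by simp)]
  rw [show (t ++ [a, b]).length - 2 = t.length by simp]
  rw [List.getElem?_append_right (le_refl _)]
  simp

lemma pvGet3 (t : List Char) (a b c : Char) :
    PySem.List.pyGet? (t ++ [a, b, c]) (-3) = some a := by
  rw [PySem.List.pyGet?_neg_ofNat _ 3 (by omega) (by simp)]
  rw [show (t ++ [a, b, c]).length - 3 = t.length by simp]
  rw [List.getElem?_append_right (le_refl _)]
  simp

-- a char different from the last of res is always appended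
lemma pvStepA_new (r : List Char) (x c : Char) (hx : x ≠ c) :
    pvStepA (r ++ [x]) c = r ++ [x] ++ [c] := by
  unfold pvStepA
  rcases List.eq_nil_or_concat' r with rfl | ⟨r', y, rfl⟩
  · simp
  · rw [if_neg (by simp)]
    rw [show r' ++ [y] ++ [x] = (r' ++ [y]) ++ [x] by simp,
        PySem.List.pyGet?_neg_one_append_singleton]
    simp [hx]

-- after an emitted pair, further copies of the run char are skipped (A's first rule)
lemma pvStepA_pair (t : List Char) (c : Char) :
    pvStepA (t ++ [c, c]) c = t ++ [c, c] := by
  unfold pvStepA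
  rw [if_neg (by simp)]
  rw [show t ++ [c, c] = (t ++ [c]) ++ [c] by simp,
      PySem.List.pyGet?_neg_one_append_singleton,
      show (t ++ [c]) ++ [c] = t ++ [c, c] by simp, pvGet2]
  simp

-- after a doubled char followed by one run char, further run chars are skipped (A's second rule)
lemma pvStepA_afterPair (t : List Char) (x c : Char) (hx : x ≠ c) :
    pvStepA (t ++ [x, x, c]) c = t ++ [x, x, c] := by
  unfold pvStepA
  rw [if_neg (by simp)]
  rw [show t ++ [x, x, c] = (t ++ [x, x]) ++ [c] by simp,
      PySem.List.pyGet?_neg_one_append_singleton,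
      show (t ++ [x, x]) ++ [c] = (t ++ [x]) ++ [x, c] by simp, pvGet2,
      show (t ++ [x]) ++ [x, c] = t ++ [x, x, c] by simp, pvGet3]
  rw [if_neg (by simp [hx])]
  rw [if_pos (by simp)]

-- with no pair right before the run, the second run char is appended
lemma pvStepA_second (r : List Char) (x c : Char) (hx : x ≠ c)
    (hr : r.getLast? ≠ some x) :
    pvStepA (r ++ [x, c]) c = r ++ [x, c] ++ [c] := by
  unfold pvStepA
  rw [if_neg (by simp)]
  rw [show r ++ [x, c] = (r ++ [x]) ++ [c] by simp,
      PySem.List.pyGet?_neg_one_append_singleton]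
  rw [show (r ++ [x]) ++ [c] = r ++ [x, c] by simp, pvGet2]
  rw [if_neg (by simp [hx])]
  rcases List.eq_nil_or_concat' r with rfl | ⟨r', y, rfl⟩
  · rw [if_neg (by simp)]
  · have hy : y ≠ x := by intro h; exact hr (by simp [h])
    rw [show r' ++ [y] ++ [x, c] = r' ++ [y, x, c] by simp, pvGet3]
    rw [if_neg (by simp [hy.symm])]

-- iterating a fixed point of A's step
lemma pvFold_fix (k : Nat) (c : Char) (res : List Char) (h : pvStepA res c = res) :
    List.foldl pvStepA res (List.replicate k c) = res := by
  induction k with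
  | zero => rfl
  | succ n ih => simp [List.replicate_succ, h, ih]

-- how many copies A keeps of a run of length k: 0, or 1 after a kept pair, else min k 2
def pvTakeN (p : Bool) (k : Nat) : Nat := if k = 0 then 0 else if p then 1 else min k 2

-- A's behaviour on one maximal run, starting from a nonempty output r ++ [x] (x ≠ run char);
-- p says whether that output ends in a doubled character
lemma pvFold_run (k : Nat) (c x : Char) (r : List Char) (p : Bool) (hx : x ≠ c)
    (hp : r.getLast? = some x ↔ p = true) :
    List.foldl pvStepA (r ++ [x]) (List.replicate k c)
      = r ++ [x] ++ List.replicate (pvTakeN p k) c := by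
  match k with
  | 0 => simp [pvTakeN]
  | 1 =>
    simp only [List.replicate_succ, List.replicate_zero, List.foldl_cons, List.foldl_nil]
    rw [pvStepA_new r x c hx]
    have h1 : pvTakeN p 1 = 1 := by cases p <;> simp [pvTakeN]
    rw [h1]; rfl
  | Nat.succ (Nat.succ m) =>
    rw [List.replicate_succ, List.replicate_succ]
    simp only [List.foldl_cons]
    rw [pvStepA_new r x c hx]
    cases p with
    | true =>
      obtain ⟨r', rfl⟩ : ∃ r', r = r' ++ [x] := by
        rcases List.eq_nil_or_concat' r with rfl | ⟨r', y, rfl⟩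
        · simp at hp
        · simp at hp; exact ⟨r', by rw [hp]⟩
      have hfix : pvStepA (r' ++ [x] ++ [x] ++ [c]) c = r' ++ [x] ++ [x] ++ [c] := by
        rw [show r' ++ [x] ++ [x] ++ [c] = r' ++ [x, x, c] by simp]
        exact pvStepA_afterPair r' x c hx
      rw [hfix, pvFold_fix m c _ hfix]
      simp [pvTakeN]
    | false =>
      have hr : r.getLast? ≠ some x := by intro h; simp [hp] at h
      have h2 : pvStepA (r ++ [x] ++ [c]) c = r ++ [x] ++ [c] ++ [c] := by
        have := pvStepA_second r x c hx hr
        rw [show r ++ [x] ++ [c] = r ++ [x, c] by simp, this]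
      rw [h2]
      have hfix : pvStepA (r ++ [x] ++ [c] ++ [c]) c = r ++ [x] ++ [c] ++ [c] := by
        rw [show r ++ [x] ++ [c] ++ [c] = (r ++ [x]) ++ [c, c] by simp]
        exact pvStepA_pair (r ++ [x]) c
      rw [pvFold_fix m c _ hfix]
      have : pvTakeN false (m + 1 + 1) = 2 := by simp [pvTakeN]
      rw [this]
      simp [List.replicate_succ]

-- A's behaviour on the first run, from the empty output
lemma pvFold_run0 (k : Nat) (c : Char) :
    List.foldl pvStepA [] (List.replicate k c) = List.replicate (min k 2) c := by
  match k with
  | 0 => simp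
  | 1 => simp [pvStepA]
  | Nat.succ (Nat.succ m) =>
    rw [List.replicate_succ, List.replicate_succ]
    simp only [List.foldl_cons]
    rw [show pvStepA [] c = [c] by simp [pvStepA]]
    rw [show pvStepA [c] c = [c, c] by simp [pvStepA]]
    have hfix : pvStepA [c, c] c = [c, c] := by simpa using pvStepA_pair [] c
    rw [pvFold_fix m c _ hfix]
    simp [List.replicate_succ]

-- run decomposition facts
lemma pvTakeWhile_rep (l : List Char) (c : Char) :
    l.takeWhile (fun d => d = c) = List.replicate (l.takeWhile (fun d => d = c)).length c := by
  rw [List.eq_replicate_length]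
  intro b hb
  have := List.mem_takeWhile_imp hb
  simpa using this

lemma pvDrop_takeWhile (p : Char → Bool) (l : List Char) :
    l.drop (l.takeWhile p).length = l.dropWhile p := by
  induction l with
  | nil => rfl
  | cons a t ih => by_cases h : p a <;> simp [h, ih]

lemma pvDropWhile_head (p : Char → Bool) (l : List Char) (c : Char) (r : List Char)
    (h : l.dropWhile p = c :: r) : p c = false := by
  have := List.head?_dropWhile_not p l
  rw [h] at this; simpa using this

-- the state invariant tying A's output so far to B's prev_pair boolean
def pvInv (res : List Char) (p : Bool) (l : List Char) : Prop :=
  (res = [] ∧ p = false) ∨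
  (∃ r x, res = r ++ [x] ∧ (r.getLast? = some x ↔ p = true) ∧ ∀ c rest, l = c :: rest → x ≠ c)

-- main invariant lemma: from any valid state, A's fold produces exactly B's output
lemma pvMain (n : Nat) : ∀ (l : List Char), l.length ≤ n → ∀ (p : Bool) (res : List Char),
    pvInv res p l → List.foldl pvStepA res l = res ++ pvAltGo p l := by
  induction n with
  | zero =>
    intro l hl p res _
    have : l = [] := List.eq_nil_of_length_eq_zero (by omega)
    subst this; simp [pvAltGo]
  | succ n ih =>
    intro l hl p res hinv
    match l with
    | [] => simp [pvAltGo]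
    | c :: rest =>
      -- decompose the head run
      obtain ⟨kw, hkw⟩ : ∃ k, (rest.takeWhile (fun d => d = c)).length = k := ⟨_, rfl⟩
      obtain ⟨rest', hrest'⟩ : ∃ r, rest.dropWhile (fun d => d = c) = r := ⟨_, rfl⟩
      have hsplit : c :: rest = List.replicate (kw + 1) c ++ rest' := by
        rw [List.replicate_succ]
        have h1 : rest = rest.takeWhile (fun d => d = c) ++ rest.dropWhile (fun d => d = c) :=
          (List.takeWhile_append_dropWhile).symm
        conv_lhs => rw [h1]
        rw [pvTakeWhile_rep rest c, hkw, hrest']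
        simp
      have hlen' : rest'.length ≤ n := by
        have h1 : rest'.length ≤ rest.length := by
          rw [← hrest']; exact List.length_dropWhile_le _ _
        have h2 : rest.length + 1 ≤ n + 1 := by simpa using hl
        omega
      have hhead' : ∀ c' r', rest' = c' :: r' → c ≠ c' := by
        intro c' r' h
        have := pvDropWhile_head (fun d => d = c) rest c' r' (hrest' ▸ h)
        simp at this; exact fun hcc => this hcc.symm
      have hdr : rest.drop kw = rest' := by
        rw [← hkw, ← hrest']; exact pvDrop_takeWhile _ rest
      -- B's side: unfold one step of pvAltGo
      have hB : pvAltGo p (c :: rest)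
          = List.replicate (pvTakeN p (kw + 1)) c
            ++ pvAltGo (decide (pvTakeN p (kw + 1) = 2)) rest' := by
        rw [pvAltGo.eq_2]
        simp only [hkw, hdr]
        have htake : (if (if 2 ≤ kw + 1 then 2 else 1) = 2 ∧ p = true
              then 1 else (if 2 ≤ kw + 1 then 2 else 1)) = pvTakeN p (kw + 1) := by
          rcases Nat.eq_zero_or_pos kw with rfl | hpos
          · cases p <;> simp [pvTakeN]
          · have hge : 2 ≤ kw + 1 := by omega
            have hm : min (kw + 1) 2 = 2 := by omega
            cases p <;> simp [pvTakeN, hge]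
        rw [htake]
      rw [hB]
      conv_lhs => rw [hsplit]
      rw [List.foldl_append]
      -- A's side on the run, then the invariant for the tail
      rcases hinv with ⟨rfl, rfl⟩ | ⟨r, x, rfl, hp, hx⟩
      · -- initial empty state
        rw [pvFold_run0 (kw + 1) c]
        rcases Nat.lt_or_ge kw 1 with hk | hk
        · have hv : pvTakeN false (kw + 1) = 1 := by
            have h0 : kw = 0 := by omega
            simp [pvTakeN, h0]
          have hmin : min (kw + 1) 2 = 1 := by omega
          rw [hv, hmin, show (decide ((1:Nat) = 2)) = false from rfl,
              show List.replicate 1 c = [c] from rfl]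
          rw [ih rest' hlen' false [c] (Or.inr ⟨[], c, by simp, by simp, hhead'⟩)]
          simp
        · have hv : pvTakeN false (kw + 1) = 2 := by
            simp [pvTakeN]; omega
          have hmin : min (kw + 1) 2 = 2 := by omega
          rw [hv, hmin, show (decide ((2:Nat) = 2)) = true from rfl,
              show List.replicate 2 c = [c, c] from rfl]
          rw [ih rest' hlen' true [c, c] (Or.inr ⟨[c], c, by simp, by simp, hhead'⟩)]
          simp
      · -- state r ++ [x]
        have hxc : x ≠ c := hx c rest rfl
        rw [pvFold_run (kw + 1) c x r p hxc hp]
        have hval : pvTakeN p (kw + 1) = 1 ∨ pvTakeN p (kw + 1) = 2 := by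
          cases p
          · simp [pvTakeN]; omega
          · simp [pvTakeN]
        rcases hval with h1 | h2
        · rw [h1, show (decide ((1:Nat) = 2)) = false from rfl,
              show List.replicate 1 c = [c] from rfl]
          rw [ih rest' hlen' false (r ++ [x] ++ [c]) (Or.inr ⟨r ++ [x], c, by simp,
            by simp [hxc], hhead'⟩)]
          simp
        · rw [h2, show (decide ((2:Nat) = 2)) = true from rfl,
              show List.replicate 2 c = [c, c] from rfl]
          rw [ih rest' hlen' true (r ++ [x] ++ [c, c]) (Or.inr ⟨r ++ [x] ++ [c], c, by simp,
            by simp, hhead'⟩)]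
          simp

-- ===== VERDICT (by name: the statement is the Claim_ definition above) =====
theorem correct_word_spelling2_spec : Claim_equal_correct_word_spelling2 := by
  intro s _
  unfold Spec_correct_word_spelling2 correct_word_spelling2 correct_word_spelling2_alt
  rw [pvMain s.toList.length s.toList (le_refl _) false [] (Or.inl ⟨rfl, rfl⟩)]
  simp
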